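-- pv_equiv track=rewrite | github.com/sobraxus/University | SECRYPT/secrypt.py | find_cosets
-- ===== SOURCE A (Python) =====
-- def find_cosets(txt, lngth):
--   txt = ''.join(i for i in txt if i.isalnum()) #remove spacing and punctuation
--   newText = txt.upper()
--   co_sets = []
--   for _ in range(0, lngth):
--     co_sets.append([])
--   for index, character in enumerate(newText):
--     co_set_index = index % lngth
--     co_sets[co_set_index].append(character)
--   kosets = []
--   for co_set in co_sets:
--     kosets.append(''.join(co_set))
--   return kosets
-- ===== SOURCE B (Python) =====
-- def find_cosets(txt, lngth):
--   newText = ''.join(c for c in txt if c.isalnum()).upper()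
--   return [''.join(newText[j] for j in range(i, len(newText), lngth))
--           for i in range(lngth)]
-- ===== Notes on version B (the rewrite author's own statement) =====
-- stated objective: simpler
-- what changed: Replaces the bucket-allocation + per-character modulo scatter (and the final join pass) with one strided gather per offset: coset i is read directly off indices i, i+lngth, i+2*lngth, ... in a single comprehension.
import Mathlib
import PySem

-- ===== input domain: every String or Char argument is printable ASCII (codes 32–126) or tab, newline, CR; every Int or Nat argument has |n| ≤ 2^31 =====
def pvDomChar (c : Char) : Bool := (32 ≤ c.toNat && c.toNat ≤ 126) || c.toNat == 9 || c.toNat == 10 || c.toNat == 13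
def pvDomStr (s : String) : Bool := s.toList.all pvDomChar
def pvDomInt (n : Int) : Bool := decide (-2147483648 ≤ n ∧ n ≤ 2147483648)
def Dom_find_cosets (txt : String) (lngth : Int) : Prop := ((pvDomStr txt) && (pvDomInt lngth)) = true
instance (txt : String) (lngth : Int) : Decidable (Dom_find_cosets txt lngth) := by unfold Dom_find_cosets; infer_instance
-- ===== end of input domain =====

-- B replaces A's bucket allocation + per-character modulo scatter (+ final join pass) by one
-- strided gather per offset (coset i read off indices i, i+lngth, …); same cost, simpler shape.
-- ===== PORT A =====
def find_cosets (txt : String) (lngth : Int) : List String :=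
  let txt2 : List Char := txt.toList.filter (fun c => PySem.Chars.isalnum c)
  let newText : List Char := PySem.Chars.upper txt2
  let co_sets0 : List (List Char) :=
    (PySem.List.pyRange 0 lngth 1).foldl (fun cs _ => cs ++ [([] : List Char)]) []
  let co_sets : List (List Char) :=
    (PySem.List.enumerate newText 0).foldl
      (fun cs p => cs.modify (PySem.Int.mod p.1 lngth).toNat (fun q => q ++ [p.2])) co_sets0
  co_sets.foldl (fun ks q => ks ++ [String.ofList q]) []

-- ===== PORT B =====
def find_cosets_alt (txt : String) (lngth : Int) : List String :=
  let newText : List Char :=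
    PySem.Chars.upper (txt.toList.filter (fun c => PySem.Chars.isalnum c))
  (PySem.List.pyRange 0 lngth 1).map (fun i =>
    String.ofList ((PySem.List.pyRange i (newText.length : Int) lngth).map
      (fun j => PySem.List.pyGetD newText j ' ')))

-- ===== PRECONDITION & SPEC =====
-- Pre_ excludes exactly the inputs where A raises: lngth ≤ 0 together with an alphanumeric
-- character in txt (ZeroDivisionError for lngth = 0, IndexError for lngth < 0).
def Pre_find_cosets (txt : String) (lngth : Int) : Prop :=
  0 < lngth ∨ txt.toList.all (fun c => !PySem.Chars.isalnum c) = true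
instance (txt : String) (lngth : Int) : Decidable (Pre_find_cosets txt lngth) := by
  unfold Pre_find_cosets; infer_instance
def pvWitness_find_cosets : String × Int := ("Hello World", 3)

def Spec_find_cosets (txt : String) (lngth : Int) (out : List String) : Prop :=
  out = find_cosets_alt txt lngth
instance (txt : String) (lngth : Int) (out : List String) : Decidable (Spec_find_cosets txt lngth out) := by
  unfold Spec_find_cosets; infer_instance

-- ===== CLAIM (what is proved, stated in full; the proofs are below) =====
def Claim_equal_find_cosets : Prop := ∀ (txt : String) (lngth : Int),
  Dom_find_cosets txt lngth → Pre_find_cosets txt lngth →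
  Spec_find_cosets txt lngth (find_cosets txt lngth)
-- ===== LEMMAS AND PROOFS =====

-- the common spec: pvStride n j l picks the elements of l at positions j, j+n, j+2n, …
def pvStride (n : Nat) : Nat → List Char → List Char
  | _, [] => []
  | 0, c :: t => c :: pvStride n (n - 1) t
  | j + 1, _ :: t => pvStride n j t

lemma pvStride_nil (n d : Nat) : pvStride n d [] = [] := by cases d <;> simp [pvStride]

lemma pvEmod_small (x n : Int) (_hn : 0 < n) (h1 : -n ≤ x) (h2 : x < n) :
    x % n = if 0 ≤ x then x else x + n := by
  split_ifs with h
  · exact Int.emod_eq_of_lt h h2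
  · have h3 : (x + n) % n = x + n := Int.emod_eq_of_lt (by omega) (by omega)
    have h4 : (x + n + n * (-1)) % n = (x + n) % n := Int.add_mul_emod_self_left (x + n) n (-1)
    have h5 : x + n + n * (-1) = x := by ring
    rw [h5] at h4
    rw [h4, h3]

lemma pvCd_hit (n j s : Int) (hn : 0 < n) (hj0 : 0 ≤ j) (hjn : j < n) :
    ((j - s) % n = 0 ↔ s % n = j) := by
  have hq := Int.ediv_add_emod s n
  have hr0 : 0 ≤ s % n := Int.emod_nonneg s (by omega)
  have hrn : s % n < n := Int.emod_lt_of_pos s hn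
  have h1 : j - s = (j - s % n) + n * (-(s / n)) := by
    have : s = n * (s / n) + s % n := hq.symm
    calc j - s = j - (n * (s / n) + s % n) := by rw [← this]
    _ = (j - s % n) + n * (-(s / n)) := by ring
  rw [h1, Int.add_mul_emod_self_left,
    pvEmod_small (j - s % n) n hn (by omega) (by omega)]
  split_ifs <;> omega

lemma pvCd_succ (n j s : Int) (hn : 0 < n) (hj0 : 0 ≤ j) (hjn : j < n) :
    (j - (s + 1)) % n = if s % n = j then n - 1 else (j - s) % n - 1 := by
  have hq := Int.ediv_add_emod s n
  have hr0 : 0 ≤ s % n := Int.emod_nonneg s (by omega)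
  have hrn : s % n < n := Int.emod_lt_of_pos s hn
  have h1 : j - (s + 1) = (j - s % n - 1) + n * (-(s / n)) := by
    have : s = n * (s / n) + s % n := hq.symm
    calc j - (s + 1) = j - ((n * (s / n) + s % n) + 1) := by rw [← this]
    _ = (j - s % n - 1) + n * (-(s / n)) := by ring
  have h2 : j - s = (j - s % n) + n * (-(s / n)) := by
    have : s = n * (s / n) + s % n := hq.symm
    calc j - s = j - (n * (s / n) + s % n) := by rw [← this]
    _ = (j - s % n) + n * (-(s / n)) := by ring
  rw [h1, h2, Int.add_mul_emod_self_left, Int.add_mul_emod_self_left,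
    pvEmod_small (j - s % n - 1) n hn (by omega) (by omega),
    pvEmod_small (j - s % n) n hn (by omega) (by omega)]
  try split_ifs <;> omega

lemma pvGetD_modify (cs : List (List Char)) (i j : Nat) (f : List Char → List Char)
    (hj : j < cs.length) :
    (cs.modify i f).getD j [] = if i = j then f (cs.getD j []) else cs.getD j [] := by
  simp [List.getD, List.getElem?_modify, List.getElem?_eq_getElem hj]

lemma pvA_len (n : Int) (l : List Char) : ∀ (s : Int) (cs : List (List Char)),
    ((PySem.List.enumerate l s).foldl
        (fun cs p => cs.modify (PySem.Int.mod p.1 n).toNat (fun q => q ++ [p.2])) cs).length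
      = cs.length := by
  induction l with
  | nil => intro s cs; simp [PySem.List.enumerate_nil]
  | cons c t ih =>
    intro s cs
    rw [PySem.List.enumerate_cons]
    simp only [List.foldl_cons]
    rw [ih]
    exact List.length_modify ..

lemma pvA_inv (n : Int) (hn : 0 < n) (l : List Char) : ∀ (s : Int) (cs : List (List Char)),
    0 ≤ s → cs.length = n.toNat → ∀ (j : Nat), (j : Int) < n →
    ((PySem.List.enumerate l s).foldl
        (fun cs p => cs.modify (PySem.Int.mod p.1 n).toNat (fun q => q ++ [p.2])) cs).getD j []
      = cs.getD j [] ++ pvStride n.toNat (((j : Int) - s) % n).toNat l := by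
  induction l with
  | nil => intro s cs hs hlen j hj; simp [PySem.List.enumerate_nil, pvStride_nil]
  | cons c t ih =>
    intro s cs hs hlen j hj
    have hj0 : (0 : Int) ≤ (j : Int) := Int.natCast_nonneg j
    rw [PySem.List.enumerate_cons]
    simp only [List.foldl_cons]
    rw [ih (s + 1) _ (by omega) (by rw [List.length_modify]; exact hlen) j hj]
    have hmod : PySem.Int.mod s n = s % n := PySem.Int.mod_eq_emod_of_pos hn
    have hr0 : 0 ≤ s % n := Int.emod_nonneg s (by omega)
    have hrn : s % n < n := Int.emod_lt_of_pos s hn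
    have hd0 : 0 ≤ (((j : Int) - s) % n) := Int.emod_nonneg _ (by omega)
    rw [pvCd_succ n j s hn hj0 hj]
    by_cases hcase : s % n = (j : Int)
    · have hidx : (PySem.Int.mod s n).toNat = j := by rw [hmod, hcase]; omega
      rw [if_pos hcase, hidx,
        pvGetD_modify cs j j _ (by omega),
        if_pos rfl]
      have hhit : ((j : Int) - s) % n = 0 := (pvCd_hit n j s hn hj0 hj).mpr hcase
      rw [hhit]
      have h1 : ((n : Int) - 1).toNat = n.toNat - 1 := by omega
      rw [h1]
      simp [pvStride]
    · have hidx : (PySem.Int.mod s n).toNat ≠ j := by rw [hmod]; omega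
      rw [if_neg hcase, pvGetD_modify cs _ j _ (by omega), if_neg hidx]
      have hne : ((j : Int) - s) % n ≠ 0 := fun h => hcase ((pvCd_hit n j s hn hj0 hj).mp h)
      obtain ⟨k, hk⟩ : ∃ k, (((j : Int) - s) % n).toNat = k + 1 :=
        ⟨(((j : Int) - s) % n).toNat - 1, by omega⟩
      have hk' : (((j : Int) - s) % n - 1).toNat = k := by omega
      rw [hk, hk']
      simp [pvStride]

lemma pvInit_eq (xs : List Int) : ∀ (acc : List (List Char)),
    xs.foldl (fun cs _ => cs ++ [([] : List Char)]) acc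
      = acc ++ List.replicate xs.length [] := by
  induction xs with
  | nil => intro acc; simp
  | cons x t ih =>
    intro acc
    simp only [List.foldl_cons, List.length_cons, List.replicate_succ]
    rw [ih]
    simp

lemma pvRange_shift (a b st : Int) (hst : 0 < st) :
    PySem.List.pyRange (a + 1) (b + 1) st = (PySem.List.pyRange a b st).map (· + 1) := by
  rw [PySem.List.pyRange_of_pos _ _ hst, PySem.List.pyRange_of_pos _ _ hst, List.map_map]
  have hcnt : (if a + 1 < b + 1 then ((b + 1 - (a + 1) + st - 1) / st).toNat else 0)
      = (if a < b then ((b - a + st - 1) / st).toNat else 0) := by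
    have h1 : b + 1 - (a + 1) + st - 1 = b - a + st - 1 := by ring
    rw [h1]
    split_ifs with h h' h' <;> first | rfl | omega
  rw [hcnt]
  apply List.map_congr_left
  intro k _
  simp only [Function.comp_apply]
  ring

lemma pvRange_cons_of_pos (a b st : Int) (hst : 0 < st) (hab : a < b) :
    PySem.List.pyRange a b st = a :: PySem.List.pyRange (a + st) b st := by
  rw [PySem.List.pyRange_of_pos _ _ hst, PySem.List.pyRange_of_pos _ _ hst]
  have hx0 : 0 ≤ b - a - 1 := by omega
  have hdiv : (b - a + st - 1) / st = (b - a - 1) / st + 1 := by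
    have : b - a + st - 1 = (b - a - 1) + 1 * st := by ring
    rw [this, Int.add_mul_ediv_right _ _ (by omega : st ≠ 0)]
  have hq0 : 0 ≤ (b - a - 1) / st := Int.ediv_nonneg hx0 (by omega)
  have hcnt1 : (if a < b then ((b - a + st - 1) / st).toNat else 0)
      = ((b - a - 1) / st).toNat + 1 := by
    rw [if_pos hab, hdiv]; omega
  have hcnt2 : (if a + st < b then ((b - (a + st) + st - 1) / st).toNat else 0)
      = ((b - a - 1) / st).toNat := by
    by_cases h : a + st < b
    · rw [if_pos h]
      have : b - (a + st) + st - 1 = b - a - 1 := by ring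
      rw [this]
    · rw [if_neg h]
      have : (b - a - 1) / st = 0 := Int.ediv_eq_zero_of_lt hx0 (by omega)
      omega
  rw [hcnt1, hcnt2, List.range_succ_eq_map]
  simp only [List.map_cons, List.map_map]
  congr 1
  · simp
  · apply List.map_congr_left
    intro k _
    simp only [Function.comp_apply]
    push_cast
    ring

lemma pvGetD_cons_succ (c : Char) (t : List Char) (k : Int) (hk : 0 ≤ k) :
    PySem.List.pyGetD (c :: t) (k + 1) ' ' = PySem.List.pyGetD t k ' ' := by
  rw [PySem.List.pyGetD_of_nonneg _ _ (by omega), PySem.List.pyGetD_of_nonneg _ _ hk]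
  have : (k + 1).toNat = k.toNat + 1 := by omega
  rw [this]
  rfl

lemma pvB_stride (n : Int) (hn : 0 < n) (l : List Char) : ∀ (j : Nat),
    (PySem.List.pyRange (j : Int) (l.length : Int) n).map (fun k => PySem.List.pyGetD l k ' ')
      = pvStride n.toNat j l := by
  induction l with
  | nil =>
    intro j
    rw [PySem.List.pyRange_of_pos _ _ hn]
    have : ¬ ((j : Int) < (([] : List Char).length : Int)) := by simp
    rw [if_neg this]
    simp [pvStride_nil]
  | cons c t ih =>
    intro j
    have hlen : ((c :: t).length : Int) = (t.length : Int) + 1 := by simp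
    cases j with
    | zero =>
      have h01 : ((0 : Nat) : Int) < ((c :: t).length : Int) := by rw [hlen]; omega
      rw [pvRange_cons_of_pos _ _ _ hn h01]
      simp only [List.map_cons]
      have hc : PySem.List.pyGetD (c :: t) ((0 : Nat) : Int) ' ' = c := by
        rw [PySem.List.pyGetD_of_nonneg _ _ (by omega)]; rfl
      rw [hc]
      have hsh : PySem.List.pyRange (((0 : Nat) : Int) + n) ((c :: t).length : Int) n
          = (PySem.List.pyRange (n - 1) (t.length : Int) n).map (· + 1) := by
        rw [← pvRange_shift _ _ _ hn]
        have e1 : (n - 1) + 1 = ((0 : Nat) : Int) + n := by ring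
        have e2 : ((t.length : Int)) + 1 = ((c :: t).length : Int) := by rw [hlen]
        rw [e1, e2]
      rw [hsh, List.map_map]
      have hmap : ((PySem.List.pyRange (n - 1) (t.length : Int) n).map
            ((fun k => PySem.List.pyGetD (c :: t) k ' ') ∘ (· + 1)))
          = (PySem.List.pyRange (n - 1) (t.length : Int) n).map
            (fun k => PySem.List.pyGetD t k ' ') := by
        apply List.map_congr_left
        intro k hk
        have hk0 : n - 1 ≤ k := ((PySem.List.mem_pyRange_iff_of_pos hn k).mp hk).1
        simp only [Function.comp_apply]
        exact pvGetD_cons_succ c t k (by omega)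
      rw [hmap]
      have hcast : ((n.toNat - 1 : Nat) : Int) = n - 1 := by omega
      have := ih (n.toNat - 1)
      rw [hcast] at this
      rw [this]
      simp [pvStride]
    | succ j' =>
      have hsh : PySem.List.pyRange ((j' + 1 : Nat) : Int) ((c :: t).length : Int) n
          = (PySem.List.pyRange (j' : Int) (t.length : Int) n).map (· + 1) := by
        rw [← pvRange_shift _ _ _ hn]
        have e1 : ((j' : Int)) + 1 = ((j' + 1 : Nat) : Int) := by omega
        have e2 : ((t.length : Int)) + 1 = ((c :: t).length : Int) := by rw [hlen]
        rw [e1, e2]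
      rw [hsh, List.map_map]
      have hmap : ((PySem.List.pyRange (j' : Int) (t.length : Int) n).map
            ((fun k => PySem.List.pyGetD (c :: t) k ' ') ∘ (· + 1)))
          = (PySem.List.pyRange (j' : Int) (t.length : Int) n).map
            (fun k => PySem.List.pyGetD t k ' ') := by
        apply List.map_congr_left
        intro k hk
        have hk0 : (j' : Int) ≤ k := ((PySem.List.mem_pyRange_iff_of_pos hn k).mp hk).1
        simp only [Function.comp_apply]
        exact pvGetD_cons_succ c t k (by omega)
      rw [hmap, ih j']
      simp [pvStride]

-- ===== VERDICT (by name: the statement is the Claim_ definition above) =====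
theorem find_cosets_spec : Claim_equal_find_cosets := by
  intro txt lngth _hdom hpre
  unfold Spec_find_cosets
  show find_cosets txt lngth = find_cosets_alt txt lngth
  simp only [find_cosets, find_cosets_alt]
  by_cases hpos : 0 < lngth
  · set L : List Char :=
      PySem.Chars.upper (txt.toList.filter (fun c => PySem.Chars.isalnum c)) with hL
    rw [pvInit_eq, List.nil_append, PySem.List.foldl_append_singleton_eq_map, List.nil_append]
    have hlen0 : (PySem.List.pyRange 0 lngth 1).length = lngth.toNat := by
      rw [PySem.List.length_pyRange_one]; omega
    rw [hlen0]
    apply List.ext_getElem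
    · rw [List.length_map, List.length_map, pvA_len lngth L 0, List.length_replicate, hlen0]
    · intro j h1 h2
      have hj : j < lngth.toNat := by
        rw [List.length_map, pvA_len lngth L 0, List.length_replicate] at h1
        exact h1
      have hji : ((j : Int)) < lngth := by omega
      rw [List.getElem_map, List.getElem_map]
      have hrange : (PySem.List.pyRange 0 lngth 1)[j]'(by
          rw [PySem.List.length_pyRange_one]; omega) = (0 : Int) + (j : Nat) :=
        PySem.List.getElem_pyRange_one 0 lngth j (by rw [PySem.List.length_pyRange_one]; omega)
      rw [hrange]
      have hA : (List.foldl
          (fun cs p => cs.modify (PySem.Int.mod p.1 lngth).toNat (fun q => q ++ [p.2]))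
          (List.replicate lngth.toNat []) (PySem.List.enumerate L 0))[j]'(by
            rw [pvA_len lngth L 0, List.length_replicate]; omega)
          = pvStride lngth.toNat j L := by
        rw [← List.getD_eq_getElem _ ([] : List Char) (by
          rw [pvA_len lngth L 0, List.length_replicate]; omega)]
        rw [pvA_inv lngth hpos L 0 _ (le_refl 0)
          (by rw [List.length_replicate]) j hji]
        have hrep : (List.replicate lngth.toNat ([] : List Char)).getD j [] = [] := by
          rw [List.getD_eq_getElem _ _ (by rw [List.length_replicate]; omega)]
          simp
        have hmodj : (((j : Int) - 0) % lngth).toNat = j := by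
          rw [sub_zero, Int.emod_eq_of_lt (by omega) hji]; omega
        rw [hrep, hmodj, List.nil_append]
      rw [hA]
      have h0j : (0 : Int) + (j : Nat) = ((j : Nat) : Int) := by ring
      rw [h0j, pvB_stride lngth hpos L j]
  · have hall : txt.toList.all (fun c => !PySem.Chars.isalnum c) = true :=
      hpre.resolve_left hpos
    have hfilt : txt.toList.filter (fun c => PySem.Chars.isalnum c) = [] := by
      rw [List.filter_eq_nil_iff]
      intro c hc
      have := List.all_eq_true.mp hall c hc
      simpa using this
    rw [hfilt]
    have hrange : PySem.List.pyRange 0 lngth 1 = [] :=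
      PySem.List.pyRange_one_eq_nil (by omega)
    have hupper : PySem.Chars.upper ([] : List Char) = [] := by rfl
    rw [hupper, hrange]
    simp [PySem.List.enumerate_nil]
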